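-- pv_equiv track=rewrite | github.com/argeweb/plugin-allpay | libs/api.py | str_replace
-- ===== SOURCE A (Python) =====
-- def str_replace(string, type_check_out=True):
--     if type_check_out:
--         mapping_dict = {'-': '%2d', '_': '%5f', '.': '%2e', '!': '%21', '*': '%2a', '(': '%28', ')': '%29',
--                         '+': '%20', '%2f': '/', '%3a': ':'}
--     else:
--         mapping_dict = {'-': '%2d', '_': '%5f', '.': '%2e', '!': '%21', '*': '%2a', '(': '%28', ')': '%29', '+': '%20'}
--     for key, val in mapping_dict.items():
--         string = string.replace(val, key)
--
--     return string
-- ===== SOURCE B (Python) =====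
-- def str_replace(string, type_check_out=True):
--     # One left-to-right scan instead of ten sequential full-string .replace passes.
--     pairs = [('%2d', '-'), ('%5f', '_'), ('%2e', '.'), ('%21', '!'),
--              ('%2a', '*'), ('%28', '('), ('%29', ')'), ('%20', '+')]
--     if type_check_out:
--         pairs += [('/', '%2f'), (':', '%3a')]
--     out = []
--     i = 0
--     n = len(string)
--     while i < n:
--         for pat, rep in pairs:
--             if string.startswith(pat, i):
--                 out.append(rep)
--                 i += len(pat)
--                 break
--         else:
--             out.append(string[i])
--             i += 1
--     return ''.join(out)
-- ===== Notes on version B (the rewrite author's own statement) =====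
-- stated objective: alternative
-- what changed: B replaces A's ten sequential full-string .replace passes by a single left-to-right scan that, at each position, matches the (pattern, replacement) table once; this is exact because no replacement output can create or destroy a later pattern occurrence.
import Mathlib
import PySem

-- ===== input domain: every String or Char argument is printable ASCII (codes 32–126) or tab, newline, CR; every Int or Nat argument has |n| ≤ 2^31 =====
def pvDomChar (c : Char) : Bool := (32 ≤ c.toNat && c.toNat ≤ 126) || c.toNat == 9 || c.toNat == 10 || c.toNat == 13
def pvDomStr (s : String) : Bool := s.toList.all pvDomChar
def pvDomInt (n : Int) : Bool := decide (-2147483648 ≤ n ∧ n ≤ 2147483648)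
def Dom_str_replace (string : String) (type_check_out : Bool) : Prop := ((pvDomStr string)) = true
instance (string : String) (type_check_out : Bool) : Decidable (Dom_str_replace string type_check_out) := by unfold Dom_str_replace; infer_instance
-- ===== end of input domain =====

-- B replaces A's up-to-ten sequential full-string .replace passes by a single
-- left-to-right scan over the same (pattern, replacement) table (objective: alternative).

-- ===== PORT A =====
-- A's dict literal as an association list (key, value) in insertion order
def pvMapBig : List (String × String) :=
  [("-", "%2d"), ("_", "%5f"), (".", "%2e"), ("!", "%21"), ("*", "%2a"),
   ("(", "%28"), (")", "%29"), ("+", "%20"), ("%2f", "/"), ("%3a", ":")]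
def pvMapSmall : List (String × String) :=
  [("-", "%2d"), ("_", "%5f"), (".", "%2e"), ("!", "%21"), ("*", "%2a"),
   ("(", "%28"), (")", "%29"), ("+", "%20")]

def str_replace (string : String) (type_check_out : Bool) : String :=
  let mapping_dict := if type_check_out then pvMapBig else pvMapSmall
  mapping_dict.foldl (fun s kv => PySem.Str.replace s kv.2 kv.1) string

-- ===== PORT B =====
-- Source B's pairs list; each pattern is stored as (head char, tail chars), so patterns are
-- nonempty by construction (they all are in Source B)
def pvPairs (type_check_out : Bool) : List ((Char × List Char) × List Char) :=
  [(('%', ['2','d']), ['-']), (('%', ['5','f']), ['_']), (('%', ['2','e']), ['.']),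
   (('%', ['2','1']), ['!']), (('%', ['2','a']), ['*']), (('%', ['2','8']), ['(']),
   (('%', ['2','9']), [')']), (('%', ['2','0']), ['+'])] ++
  (if type_check_out then [(('/', []), ['%','2','f']), ((':', []), ['%','3','a'])] else [])

-- Source B's while-loop: at each position try the pairs in order (the for/else), emit the
-- replacement and skip the matched pattern, otherwise copy one character
def pvScan (ps : List ((Char × List Char) × List Char)) : List Char → List Char
  | [] => []
  | c :: rest =>
    match ps.find? (fun pr => (pr.1.1 :: pr.1.2).isPrefixOf (c :: rest)) with
    | some pr => pr.2 ++ pvScan ps (rest.drop pr.1.2.length)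
    | none => c :: pvScan ps rest
termination_by l => l.length
decreasing_by
  · simp only [List.length_cons, List.length_drop]; omega
  · simp only [List.length_cons]; omega

def str_replace_alt (string : String) (type_check_out : Bool) : String :=
  String.ofList (pvScan (pvPairs type_check_out) string.toList)

-- ===== PRECONDITION & SPEC =====
def Spec_str_replace (string : String) (type_check_out : Bool) (out : String) : Prop := out = str_replace_alt string type_check_out
instance (string : String) (type_check_out : Bool) (out : String) : Decidable (Spec_str_replace string type_check_out out) := by unfold Spec_str_replace; infer_instance

-- ===== CLAIM (what is proved, stated in full; the proofs are below) =====
def Claim_equal_str_replace : Prop := ∀ (string : String) (type_check_out : Bool), Dom_str_replace string type_check_out → Spec_str_replace string type_check_out (str_replace string type_check_out)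

-- ===== LEMMAS AND PROOFS =====

-- fuel-free form of Python's str.replace for a nonempty pattern
def pvRep (old new : List Char) : List Char → List Char
  | [] => []
  | c :: t =>
    if old.isPrefixOf (c :: t) then new ++ pvRep old new (t.drop (old.length - 1))
    else c :: pvRep old new t
termination_by l => l.length
decreasing_by
  · simp only [List.length_cons, List.length_drop]; omega
  · simp only [List.length_cons]; omega

theorem pvRep_nil (old new : List Char) : pvRep old new [] = [] := by
  rw [pvRep.eq_def]

theorem pvRep_cons (old new : List Char) (c : Char) (t : List Char) :
    pvRep old new (c :: t) =
      if old.isPrefixOf (c :: t) then new ++ pvRep old new (t.drop (old.length - 1))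
      else c :: pvRep old new t := by
  rw [pvRep.eq_def]

theorem pvScan_nil (ps : List ((Char × List Char) × List Char)) : pvScan ps [] = [] := by
  rw [pvScan.eq_def]

theorem pvScan_cons (ps : List ((Char × List Char) × List Char)) (c : Char) (rest : List Char) :
    pvScan ps (c :: rest) =
      match ps.find? (fun pr => (pr.1.1 :: pr.1.2).isPrefixOf (c :: rest)) with
      | some pr => pr.2 ++ pvScan ps (rest.drop pr.1.2.length)
      | none => c :: pvScan ps rest := by
  rw [pvScan.eq_def]

theorem pvScan_cons_some {ps : List ((Char × List Char) × List Char)} {c : Char} {rest : List Char}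
    {pr : (Char × List Char) × List Char}
    (h : ps.find? (fun pr => (pr.1.1 :: pr.1.2).isPrefixOf (c :: rest)) = some pr) :
    pvScan ps (c :: rest) = pr.2 ++ pvScan ps (rest.drop pr.1.2.length) := by
  rw [pvScan_cons, h]

theorem pvScan_cons_none {ps : List ((Char × List Char) × List Char)} {c : Char} {rest : List Char}
    (h : ps.find? (fun pr => (pr.1.1 :: pr.1.2).isPrefixOf (c :: rest)) = none) :
    pvScan ps (c :: rest) = c :: pvScan ps rest := by
  rw [pvScan_cons, h]

theorem pvScan_nil_ps : ∀ l : List Char, pvScan [] l = l := by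
  intro l
  induction l with
  | nil => exact pvScan_nil []
  | cons c rest ih => rw [pvScan_cons_none (by simp), ih]

theorem pvGo_eq (old new : List Char) (h : 1 ≤ old.length) :
    ∀ fuel (l acc : List Char), l.length ≤ fuel →
      PySem.Chars.replace.go old new fuel l acc = acc.reverse ++ pvRep old new l := by
  intro fuel
  induction fuel with
  | zero =>
    intro l acc hl
    have hln : l = [] := List.eq_nil_of_length_eq_zero (Nat.le_zero.mp hl)
    subst hln
    rw [PySem.Chars.replace.go.eq_def]
    simp [pvRep_nil]
  | succ f ih =>
    intro l acc hl
    cases l with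
    | nil =>
      rw [PySem.Chars.replace.go.eq_def]
      simp [pvRep_nil]
    | cons c t =>
      rw [PySem.Chars.replace.go.eq_def]
      show (if old.isPrefixOf (c :: t) = true then
          PySem.Chars.replace.go old new f (List.drop old.length (c :: t)) (new.reverse ++ acc)
        else PySem.Chars.replace.go old new f t (c :: acc)) = acc.reverse ++ pvRep old new (c :: t)
      by_cases hp : old.isPrefixOf (c :: t) = true
      · rw [if_pos hp]
        have hdrop : (c :: t).drop old.length = t.drop (old.length - 1) := by
          obtain ⟨m, hm⟩ : ∃ m, old.length = m + 1 := ⟨old.length - 1, by omega⟩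
          rw [hm]
          simp
        have hlen : ((c :: t).drop old.length).length ≤ f := by
          simp only [List.length_drop, List.length_cons]
          simp only [List.length_cons] at hl
          omega
        rw [ih _ _ hlen, pvRep_cons, if_pos hp, hdrop]
        simp
      · rw [if_neg hp]
        have hlen : t.length ≤ f := by simp only [List.length_cons] at hl; omega
        rw [ih _ _ hlen, pvRep_cons, if_neg hp]
        simp

theorem pvReplace_eq (s old new : List Char) (h : old ≠ []) :
    PySem.Chars.replace s old new = pvRep old new s := by
  unfold PySem.Chars.replace
  rw [if_neg (by simp [h])]
  have hlen : 1 ≤ old.length := by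
    cases old with
    | nil => exact absurd rfl h
    | cons a as => simp
  simpa using pvGo_eq old new hlen s.length s [] le_rfl

theorem pvRep_append (q0 : Char) (qt new : List Char) :
    ∀ (a z : List Char), q0 ∉ a →
      pvRep (q0 :: qt) new (a ++ z) = a ++ pvRep (q0 :: qt) new z := by
  intro a
  induction a with
  | nil => intro z _; simp
  | cons c a' ih =>
    intro z hq
    have hc : q0 ≠ c := fun hh => hq (by simp [hh])
    have hnp : ¬ ((q0 :: qt).isPrefixOf (c :: (a' ++ z)) = true) := fun hh =>
      hc (List.cons_prefix_cons.mp (List.isPrefixOf_iff_prefix.mp hh)).1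
    rw [List.cons_append, pvRep_cons, if_neg hnp, ih z (fun hm => hq (by simp [hm]))]
    rfl

theorem pvFind_none {ps : List ((Char × List Char) × List Char)} {c : Char} {w : List Char}
    (h : ∀ pr ∈ ps, pr.1.1 ≠ c) :
    ps.find? (fun pr => (pr.1.1 :: pr.1.2).isPrefixOf (c :: w)) = none := by
  apply List.find?_eq_none.mpr
  intro pr hpr
  simp only [List.isPrefixOf_iff_prefix]
  intro hpre
  exact absurd (List.cons_prefix_cons.mp hpre).1 (h pr hpr)

theorem pvScan_append (ps : List ((Char × List Char) × List Char)) :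
    ∀ (a z : List Char), (∀ pr ∈ ps, pr.1.1 ∉ a) →
      pvScan ps (a ++ z) = a ++ pvScan ps z := by
  intro a
  induction a with
  | nil => intro z _; simp
  | cons c a' ih =>
    intro z hh
    rw [List.cons_append,
        pvScan_cons_none (pvFind_none (fun pr hpr hc => hh pr hpr (by simp [hc]))),
        ih z (fun pr hpr hm => hh pr hpr (by simp [hm]))]
    rfl

theorem pvNotPrefix_scan (ps : List ((Char × List Char) × List Char))
    (hout : ∀ pr ∈ ps, pr.2 ≠ []) :
    ∀ (n : Nat) (y t : List Char), y.length ≤ n →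
      (∀ pr ∈ ps, ∀ c ∈ t, pr.2.head? ≠ some c) →
      ¬ t <+: y → ¬ t <+: pvScan ps y := by
  intro n
  induction n with
  | zero =>
    intro y t hy _ hnp
    have hy0 : y = [] := List.eq_nil_of_length_eq_zero (Nat.le_zero.mp hy)
    subst hy0
    rw [pvScan_nil]
    exact hnp
  | succ m ih =>
    intro y t hy ht hnp
    cases y with
    | nil => rw [pvScan_nil]; exact hnp
    | cons c rest =>
      cases t with
      | nil => exact absurd List.nil_prefix hnp
      | cons t0 t' =>
        cases hf : ps.find? (fun pr => (pr.1.1 :: pr.1.2).isPrefixOf (c :: rest)) with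
        | some pr =>
          rw [pvScan_cons_some hf]
          have hmem : pr ∈ ps := List.mem_of_find?_eq_some hf
          intro hpre
          cases hr : pr.2 with
          | nil => exact (hout pr hmem) hr
          | cons r0 r' =>
            rw [hr] at hpre
            have ht0 : t0 = r0 := (List.cons_prefix_cons.mp (by simpa using hpre)).1
            have hhead := ht pr hmem t0 (by simp)
            rw [hr, ht0] at hhead
            simp at hhead
        | none =>
          rw [pvScan_cons_none hf]
          intro hpre
          obtain ⟨he, hpre'⟩ := List.cons_prefix_cons.mp hpre
          subst he
          have hnp' : ¬ t' <+: rest := fun hq => hnp (List.cons_prefix_cons.mpr ⟨rfl, hq⟩)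
          exact ih rest t' (by simp only [List.length_cons] at hy; omega)
            (fun pr hpr c' hc' => ht pr hpr c' (by simp [hc'])) hnp' hpre'

theorem pvFind_append (ps : List ((Char × List Char) × List Char))
    (q : (Char × List Char) × List Char) (p : ((Char × List Char) × List Char) → Bool) :
    (ps ++ [q]).find? p = ((ps.find? p).or ([q].find? p)) := by
  induction ps with
  | nil => simp
  | cons x xs ih =>
    cases hx : p x with
    | true => simp [List.find?, hx]
    | false => simp [List.find?, hx, ih]

-- THE FUSION LEMMA: one more replace pass after the scan = the scan with one more pair,
-- provided the new pattern cannot interact with the earlier outputs and vice versa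
theorem pvFuse (ps : List ((Char × List Char) × List Char)) (q0 : Char) (qt rep : List Char)
    (h2 : ∀ pr ∈ ps, pr.2 ≠ [])
    (h3 : ∀ pr ∈ ps, q0 ∉ pr.2)
    (h4 : ∀ pr ∈ ps, ∀ c ∈ qt, pr.2.head? ≠ some c)
    (h5 : ∀ pr ∈ ps, pr.1.1 ∉ qt) :
    ∀ (n : Nat) (l : List Char), l.length ≤ n →
      pvRep (q0 :: qt) rep (pvScan ps l) = pvScan (ps ++ [((q0, qt), rep)]) l := by
  intro n
  induction n with
  | zero =>
    intro l hl
    have hl0 : l = [] := List.eq_nil_of_length_eq_zero (Nat.le_zero.mp hl)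
    subst hl0
    rw [pvScan_nil, pvScan_nil, pvRep_nil]
  | succ m ih =>
    intro l hl
    cases l with
    | nil => rw [pvScan_nil, pvScan_nil, pvRep_nil]
    | cons c rest =>
      cases hf : ps.find? (fun pr => (pr.1.1 :: pr.1.2).isPrefixOf (c :: rest)) with
      | some pr =>
        have hmem : pr ∈ ps := List.mem_of_find?_eq_some hf
        rw [pvScan_cons_some hf]
        have hfap : (ps ++ [((q0, qt), rep)]).find?
            (fun pr => (pr.1.1 :: pr.1.2).isPrefixOf (c :: rest)) = some pr := by
          rw [pvFind_append, hf]
          rfl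
        rw [pvScan_cons_some hfap, pvRep_append q0 qt rep pr.2 _ (h3 pr hmem)]
        congr 1
        exact ih _ (by
          simp only [List.length_cons] at hl
          simp only [List.length_drop]
          omega)
      | none =>
        by_cases hq : (q0 :: qt).isPrefixOf (c :: rest) = true
        · -- the new pattern matches at this position
          obtain ⟨hq0, hqt⟩ := List.cons_prefix_cons.mp (List.isPrefixOf_iff_prefix.mp hq)
          obtain ⟨r2, hr2⟩ := hqt
          have hfap : (ps ++ [((q0, qt), rep)]).find?
              (fun pr => (pr.1.1 :: pr.1.2).isPrefixOf (c :: rest)) =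
              some ((q0, qt), rep) := by
            rw [pvFind_append, hf]
            simp [hq]
          rw [pvScan_cons_some hfap, pvScan_cons_none hf]
          subst hr2
          rw [pvScan_append ps qt r2 h5]
          have hpos : (q0 :: qt).isPrefixOf (c :: (qt ++ pvScan ps r2)) = true := by
            rw [List.isPrefixOf_iff_prefix]
            exact List.cons_prefix_cons.mpr ⟨hq0, List.prefix_append _ _⟩
          rw [pvRep_cons, if_pos hpos]
          simp only [List.length_cons, Nat.add_sub_cancel, List.drop_left]
          congr 1
          exact ih r2 (by
            simp only [List.length_cons, List.length_append] at hl
            omega)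
        · -- neither an old pair nor the new pattern matches here
          have hfap : (ps ++ [((q0, qt), rep)]).find?
              (fun pr => (pr.1.1 :: pr.1.2).isPrefixOf (c :: rest)) = none := by
            rw [pvFind_append, hf]
            simp [hq]
          rw [pvScan_cons_none hf, pvScan_cons_none hfap]
          have hneg : ¬ ((q0 :: qt).isPrefixOf (c :: pvScan ps rest) = true) := by
            intro hpre0
            obtain ⟨he, hpre'⟩ := List.cons_prefix_cons.mp (List.isPrefixOf_iff_prefix.mp hpre0)
            have hqrest : ¬ qt <+: rest := by
              intro hqr
              exact hq (by
                rw [List.isPrefixOf_iff_prefix]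
                exact List.cons_prefix_cons.mpr ⟨he, hqr⟩)
            exact pvNotPrefix_scan ps h2 rest.length rest qt le_rfl h4 hqrest hpre'
          rw [pvRep_cons, if_neg hneg]
          congr 1
          exact ih rest (by simp only [List.length_cons] at hl; omega)

-- the ten fusion steps, with the concrete tables
theorem pvStep1 (l : List Char) :
    pvRep ['%','2','d'] ['-'] l = pvScan [(('%', ['2','d']), ['-'])] l := by
  have h := pvFuse [] '%' ['2','d'] ['-'] (by simp) (by simp) (by simp) (by simp) l.length l le_rfl
  rw [pvScan_nil_ps] at h
  simpa using h

theorem pvStep2 (l : List Char) :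
    pvRep ['%','5','f'] ['_'] (pvScan [(('%', ['2','d']), ['-'])] l) =
      pvScan [(('%', ['2','d']), ['-']), (('%', ['5','f']), ['_'])] l := by
  simpa using pvFuse [(('%', ['2','d']), ['-'])] '%' ['5','f'] ['_']
    (by simp) (by simp) (by simp) (by simp) l.length l le_rfl

theorem pvStep3 (l : List Char) :
    pvRep ['%','2','e'] ['.'] (pvScan [(('%', ['2','d']), ['-']), (('%', ['5','f']), ['_'])] l) =
      pvScan [(('%', ['2','d']), ['-']), (('%', ['5','f']), ['_']), (('%', ['2','e']), ['.'])] l := by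
  simpa using pvFuse [(('%', ['2','d']), ['-']), (('%', ['5','f']), ['_'])] '%' ['2','e'] ['.']
    (by simp) (by simp) (by simp) (by simp) l.length l le_rfl

theorem pvStep4 (l : List Char) :
    pvRep ['%','2','1'] ['!'] (pvScan [(('%', ['2','d']), ['-']), (('%', ['5','f']), ['_']), (('%', ['2','e']), ['.'])] l) =
      pvScan [(('%', ['2','d']), ['-']), (('%', ['5','f']), ['_']), (('%', ['2','e']), ['.']), (('%', ['2','1']), ['!'])] l := by
  simpa using pvFuse [(('%', ['2','d']), ['-']), (('%', ['5','f']), ['_']), (('%', ['2','e']), ['.'])] '%' ['2','1'] ['!']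
    (by simp) (by simp) (by simp) (by simp) l.length l le_rfl

theorem pvStep5 (l : List Char) :
    pvRep ['%','2','a'] ['*'] (pvScan [(('%', ['2','d']), ['-']), (('%', ['5','f']), ['_']), (('%', ['2','e']), ['.']), (('%', ['2','1']), ['!'])] l) =
      pvScan [(('%', ['2','d']), ['-']), (('%', ['5','f']), ['_']), (('%', ['2','e']), ['.']), (('%', ['2','1']), ['!']), (('%', ['2','a']), ['*'])] l := by
  simpa using pvFuse [(('%', ['2','d']), ['-']), (('%', ['5','f']), ['_']), (('%', ['2','e']), ['.']), (('%', ['2','1']), ['!'])] '%' ['2','a'] ['*']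
    (by simp) (by simp) (by simp) (by simp) l.length l le_rfl

theorem pvStep6 (l : List Char) :
    pvRep ['%','2','8'] ['('] (pvScan [(('%', ['2','d']), ['-']), (('%', ['5','f']), ['_']), (('%', ['2','e']), ['.']), (('%', ['2','1']), ['!']), (('%', ['2','a']), ['*'])] l) =
      pvScan [(('%', ['2','d']), ['-']), (('%', ['5','f']), ['_']), (('%', ['2','e']), ['.']), (('%', ['2','1']), ['!']), (('%', ['2','a']), ['*']), (('%', ['2','8']), ['('])] l := by
  simpa using pvFuse [(('%', ['2','d']), ['-']), (('%', ['5','f']), ['_']), (('%', ['2','e']), ['.']), (('%', ['2','1']), ['!']), (('%', ['2','a']), ['*'])] '%' ['2','8'] ['(']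
    (by simp) (by simp) (by simp) (by simp) l.length l le_rfl

theorem pvStep7 (l : List Char) :
    pvRep ['%','2','9'] [')'] (pvScan [(('%', ['2','d']), ['-']), (('%', ['5','f']), ['_']), (('%', ['2','e']), ['.']), (('%', ['2','1']), ['!']), (('%', ['2','a']), ['*']), (('%', ['2','8']), ['('])] l) =
      pvScan [(('%', ['2','d']), ['-']), (('%', ['5','f']), ['_']), (('%', ['2','e']), ['.']), (('%', ['2','1']), ['!']), (('%', ['2','a']), ['*']), (('%', ['2','8']), ['(']), (('%', ['2','9']), [')'])] l := by
  simpa using pvFuse [(('%', ['2','d']), ['-']), (('%', ['5','f']), ['_']), (('%', ['2','e']), ['.']), (('%', ['2','1']), ['!']), (('%', ['2','a']), ['*']), (('%', ['2','8']), ['('])] '%' ['2','9'] [')']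
    (by simp) (by simp) (by simp) (by simp) l.length l le_rfl

theorem pvStep8 (l : List Char) :
    pvRep ['%','2','0'] ['+'] (pvScan [(('%', ['2','d']), ['-']), (('%', ['5','f']), ['_']), (('%', ['2','e']), ['.']), (('%', ['2','1']), ['!']), (('%', ['2','a']), ['*']), (('%', ['2','8']), ['(']), (('%', ['2','9']), [')'])] l) =
      pvScan [(('%', ['2','d']), ['-']), (('%', ['5','f']), ['_']), (('%', ['2','e']), ['.']), (('%', ['2','1']), ['!']), (('%', ['2','a']), ['*']), (('%', ['2','8']), ['(']), (('%', ['2','9']), [')']), (('%', ['2','0']), ['+'])] l := by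
  simpa using pvFuse [(('%', ['2','d']), ['-']), (('%', ['5','f']), ['_']), (('%', ['2','e']), ['.']), (('%', ['2','1']), ['!']), (('%', ['2','a']), ['*']), (('%', ['2','8']), ['(']), (('%', ['2','9']), [')'])] '%' ['2','0'] ['+']
    (by simp) (by simp) (by simp) (by simp) l.length l le_rfl

theorem pvStep9 (l : List Char) :
    pvRep ['/'] ['%','2','f'] (pvScan [(('%', ['2','d']), ['-']), (('%', ['5','f']), ['_']), (('%', ['2','e']), ['.']), (('%', ['2','1']), ['!']), (('%', ['2','a']), ['*']), (('%', ['2','8']), ['(']), (('%', ['2','9']), [')']), (('%', ['2','0']), ['+'])] l) =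
      pvScan [(('%', ['2','d']), ['-']), (('%', ['5','f']), ['_']), (('%', ['2','e']), ['.']), (('%', ['2','1']), ['!']), (('%', ['2','a']), ['*']), (('%', ['2','8']), ['(']), (('%', ['2','9']), [')']), (('%', ['2','0']), ['+']), (('/', []), ['%','2','f'])] l := by
  simpa using pvFuse [(('%', ['2','d']), ['-']), (('%', ['5','f']), ['_']), (('%', ['2','e']), ['.']), (('%', ['2','1']), ['!']), (('%', ['2','a']), ['*']), (('%', ['2','8']), ['(']), (('%', ['2','9']), [')']), (('%', ['2','0']), ['+'])] '/' [] ['%','2','f']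
    (by simp) (by simp) (by simp) (by simp) l.length l le_rfl

theorem pvStep10 (l : List Char) :
    pvRep [':'] ['%','3','a'] (pvScan [(('%', ['2','d']), ['-']), (('%', ['5','f']), ['_']), (('%', ['2','e']), ['.']), (('%', ['2','1']), ['!']), (('%', ['2','a']), ['*']), (('%', ['2','8']), ['(']), (('%', ['2','9']), [')']), (('%', ['2','0']), ['+']), (('/', []), ['%','2','f'])] l) =
      pvScan [(('%', ['2','d']), ['-']), (('%', ['5','f']), ['_']), (('%', ['2','e']), ['.']), (('%', ['2','1']), ['!']), (('%', ['2','a']), ['*']), (('%', ['2','8']), ['(']), (('%', ['2','9']), [')']), (('%', ['2','0']), ['+']), (('/', []), ['%','2','f']), ((':', []), ['%','3','a'])] l := by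
  simpa using pvFuse [(('%', ['2','d']), ['-']), (('%', ['5','f']), ['_']), (('%', ['2','e']), ['.']), (('%', ['2','1']), ['!']), (('%', ['2','a']), ['*']), (('%', ['2','8']), ['(']), (('%', ['2','9']), [')']), (('%', ['2','0']), ['+']), (('/', []), ['%','2','f'])] ':' [] ['%','3','a']
    (by simp) (by simp) (by simp) (by simp) l.length l le_rfl

theorem pvChainFalse (l : List Char) :
    pvRep ['%','2','0'] ['+'] (pvRep ['%','2','9'] [')'] (pvRep ['%','2','8'] ['('] (pvRep ['%','2','a'] ['*'] (pvRep ['%','2','1'] ['!'] (pvRep ['%','2','e'] ['.'] (pvRep ['%','5','f'] ['_'] (pvRep ['%','2','d'] ['-'] l))))))) =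
      pvScan (pvPairs false) l := by
  rw [pvStep1, pvStep2, pvStep3, pvStep4, pvStep5, pvStep6, pvStep7, pvStep8]
  simp [pvPairs]

theorem pvChainTrue (l : List Char) :
    pvRep [':'] ['%','3','a'] (pvRep ['/'] ['%','2','f'] (pvRep ['%','2','0'] ['+'] (pvRep ['%','2','9'] [')'] (pvRep ['%','2','8'] ['('] (pvRep ['%','2','a'] ['*'] (pvRep ['%','2','1'] ['!'] (pvRep ['%','2','e'] ['.'] (pvRep ['%','5','f'] ['_'] (pvRep ['%','2','d'] ['-'] l))))))))) =
      pvScan (pvPairs true) l := by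
  rw [pvStep1, pvStep2, pvStep3, pvStep4, pvStep5, pvStep6, pvStep7, pvStep8, pvStep9, pvStep10]
  simp [pvPairs]

theorem pvMain (s : String) (t : Bool) : str_replace s t = str_replace_alt s t := by
  apply String.toList_inj.mp
  have hB : (str_replace_alt s t).toList = pvScan (pvPairs t) s.toList := by
    simp [str_replace_alt]
  rw [hB]
  cases t with
  | false =>
    have hA : str_replace s false =
        List.foldl (fun s kv => PySem.Str.replace s kv.2 kv.1) s pvMapSmall := rfl
    rw [hA]
    simp only [pvMapSmall, List.foldl_cons, List.foldl_nil, PySem.Str.toList_replace]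
    rw [pvReplace_eq _ _ _ (by decide), pvReplace_eq _ _ _ (by decide),
        pvReplace_eq _ _ _ (by decide), pvReplace_eq _ _ _ (by decide),
        pvReplace_eq _ _ _ (by decide), pvReplace_eq _ _ _ (by decide),
        pvReplace_eq _ _ _ (by decide), pvReplace_eq _ _ _ (by decide)]
    simp only [show "%2d".toList = ['%','2','d'] from rfl, show "-".toList = ['-'] from rfl,
      show "%5f".toList = ['%','5','f'] from rfl, show "_".toList = ['_'] from rfl,
      show "%2e".toList = ['%','2','e'] from rfl, show ".".toList = ['.'] from rfl,
      show "%21".toList = ['%','2','1'] from rfl, show "!".toList = ['!'] from rfl,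
      show "%2a".toList = ['%','2','a'] from rfl, show "*".toList = ['*'] from rfl,
      show "%28".toList = ['%','2','8'] from rfl, show "(".toList = ['('] from rfl,
      show "%29".toList = ['%','2','9'] from rfl, show ")".toList = [')'] from rfl,
      show "%20".toList = ['%','2','0'] from rfl, show "+".toList = ['+'] from rfl]
    exact pvChainFalse s.toList
  | true =>
    have hA : str_replace s true =
        List.foldl (fun s kv => PySem.Str.replace s kv.2 kv.1) s pvMapBig := rfl
    rw [hA]
    simp only [pvMapBig, List.foldl_cons, List.foldl_nil, PySem.Str.toList_replace]
    rw [pvReplace_eq _ _ _ (by decide), pvReplace_eq _ _ _ (by decide),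
        pvReplace_eq _ _ _ (by decide), pvReplace_eq _ _ _ (by decide),
        pvReplace_eq _ _ _ (by decide), pvReplace_eq _ _ _ (by decide),
        pvReplace_eq _ _ _ (by decide), pvReplace_eq _ _ _ (by decide),
        pvReplace_eq _ _ _ (by decide), pvReplace_eq _ _ _ (by decide)]
    simp only [show "%2d".toList = ['%','2','d'] from rfl, show "-".toList = ['-'] from rfl,
      show "%5f".toList = ['%','5','f'] from rfl, show "_".toList = ['_'] from rfl,
      show "%2e".toList = ['%','2','e'] from rfl, show ".".toList = ['.'] from rfl,
      show "%21".toList = ['%','2','1'] from rfl, show "!".toList = ['!'] from rfl,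
      show "%2a".toList = ['%','2','a'] from rfl, show "*".toList = ['*'] from rfl,
      show "%28".toList = ['%','2','8'] from rfl, show "(".toList = ['('] from rfl,
      show "%29".toList = ['%','2','9'] from rfl, show ")".toList = [')'] from rfl,
      show "%20".toList = ['%','2','0'] from rfl, show "+".toList = ['+'] from rfl,
      show "%2f".toList = ['%','2','f'] from rfl, show "/".toList = ['/'] from rfl,
      show "%3a".toList = ['%','3','a'] from rfl, show ":".toList = [':'] from rfl]
    exact pvChainTrue s.toList

-- ===== VERDICT (by name: the statement is the Claim_ definition above) =====
theorem str_replace_spec : Claim_equal_str_replace := by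
  intro string type_check_out _
  unfold Spec_str_replace
  exact pvMain string type_check_out
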